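-- pv_equiv track=rewrite | github.com/gulyas/network_games_analysis | python_scripts/user_scaffold_analysis_mysql_pathpy.py | listrun
-- ===== SOURCE A (Python) =====
-- def listrun(pattern, values):
--     """Find runs in a pattern containing elements from given values"""
--     runs = list()
--     run = list()
--     for i in pattern:
--         if i in values:
--             run.append(i)
--         else:
--             if len(run) > 1:
--                 runs.append(run)
--                 run = list()
--             elif len(run) == 1:
--                 run = list()
--     if len(run) > 1:
--         runs.append(run)
--     return runs
-- ===== SOURCE B (Python) =====
-- def listrun(pattern, values):
--     """Find runs in a pattern containing elements from given values"""
--     n = len(pattern)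
--     mem = [x in values for x in pattern]
--     starts = [i for i in range(n) if mem[i] and (i == 0 or not mem[i - 1])]
--     ends = [i + 1 for i in range(n) if mem[i] and (i == n - 1 or not mem[i + 1])]
--     return [pattern[s:e] for s, e in zip(starts, ends) if e - s > 1]
-- ===== Notes on version B (the rewrite author's own statement) =====
-- stated objective: alternative
-- what changed: Replaces A's single-pass run-accumulator state machine with a staged boundary-detection pipeline: precompute a membership mask, derive run start and end indices from mask transitions, then slice the pattern at those boundaries keeping runs longer than 1.
import Mathlib
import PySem

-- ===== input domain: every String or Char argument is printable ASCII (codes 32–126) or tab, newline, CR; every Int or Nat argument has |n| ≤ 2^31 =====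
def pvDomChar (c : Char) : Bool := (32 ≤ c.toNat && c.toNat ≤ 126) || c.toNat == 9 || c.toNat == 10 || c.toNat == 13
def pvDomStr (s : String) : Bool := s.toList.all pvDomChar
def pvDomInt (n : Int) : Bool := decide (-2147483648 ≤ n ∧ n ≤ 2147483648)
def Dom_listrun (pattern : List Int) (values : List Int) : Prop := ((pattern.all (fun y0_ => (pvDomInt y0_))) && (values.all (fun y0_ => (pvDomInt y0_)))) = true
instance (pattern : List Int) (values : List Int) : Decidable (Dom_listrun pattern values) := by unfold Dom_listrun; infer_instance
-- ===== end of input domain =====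

-- B replaces A's single-pass run-accumulator state machine with a staged boundary-detection
-- pipeline (membership mask, start/end indices from mask transitions, then slicing); same cost.
-- ===== PORT A =====
-- A's loop over `pattern` with state (runs, run), then the trailing flush.
def listrunGo (values : List Int) (runs : List (List Int)) (run : List Int) : List Int → List (List Int)
  | [] => if run.length > 1 then runs ++ [run] else runs
  | i :: rest =>
    if i ∈ values then
      listrunGo values runs (run ++ [i]) rest
    else
      if run.length > 1 then
        listrunGo values (runs ++ [run]) [] rest
      else if run.length = 1 then
        listrunGo values runs [] rest
      else
        listrunGo values runs run rest

def listrun (pattern : List Int) (values : List Int) : List (List Int) :=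
  listrunGo values [] [] pattern

-- ===== PORT B =====
-- mem = [x in values for x in pattern]; starts/ends = boundary indices read off the mask;
-- pattern[s:e] with 0 ≤ s < e ≤ len(pattern) is exactly (pattern.drop s).take (e - s).
-- Python's short-circuit `or` means mem[i-1]/mem[i+1] are only read in range; `getD … false`
-- is exact there (and the guard makes the out-of-range default irrelevant).
def listrun_alt (pattern : List Int) (values : List Int) : List (List Int) :=
  let n := pattern.length
  let mem := pattern.map (fun x => decide (x ∈ values))
  let starts := (List.range n).filter (fun i => mem.getD i false && (i == 0 || !(mem.getD (i - 1) false)))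
  let ends := ((List.range n).filter (fun i => mem.getD i false && (i == n - 1 || !(mem.getD (i + 1) false)))).map (· + 1)
  (starts.zip ends).filterMap (fun p => if 1 < p.2 - p.1 then some ((pattern.drop p.1).take (p.2 - p.1)) else none)

-- ===== PRECONDITION & SPEC =====
def Spec_listrun (pattern : List Int) (values : List Int) (out : List (List Int)) : Prop := out = listrun_alt pattern values
instance (pattern : List Int) (values : List Int) (out : List (List Int)) : Decidable (Spec_listrun pattern values out) := by unfold Spec_listrun; infer_instance

-- ===== CLAIM (what is proved, stated in full; the proofs are below) =====
def Claim_equal_listrun : Prop := ∀ (pattern : List Int) (values : List Int), Dom_listrun pattern values → Spec_listrun pattern values (listrun pattern values)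

-- ===== LEMMAS AND PROOFS =====

-- Proof-only intermediate: the decomposition of `pattern` into maximal constant-membership chunks.
def chunkBy (values : List Int) : List Int → List (Bool × List Int)
  | [] => []
  | x :: xs =>
    let k := decide (x ∈ values)
    let s := xs.span (fun y => decide (y ∈ values) == k)
    (k, x :: s.1) :: chunkBy values s.2
termination_by l => l.length
decreasing_by
  simp only [List.span_eq_takeWhile_dropWhile]
  exact Nat.lt_succ_of_le (List.length_dropWhile_le _ _)

def chunkSel (p : Bool × List Int) : Option (List Int) :=
  if p.1 then (if 1 < p.2.length then some p.2 else none) else none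

-- ---------- A-side: the state machine equals the chunk decomposition ----------

-- The `runs` accumulator of A's loop is only appended to.
theorem listrunGo_append (values : List Int) (runs : List (List Int)) (run : List Int)
    (l : List Int) : listrunGo values runs run l = runs ++ listrunGo values [] run l := by
  induction l generalizing runs run with
  | nil => simp [listrunGo]; split_ifs <;> simp
  | cons i rest ih =>
    simp only [listrunGo]
    split_ifs with h1 h2 h3
    · rw [ih, ih (runs := [])]
    · simp only [List.nil_append]; rw [ih, ih (runs := [run])]; simp
    · rw [ih, ih (runs := [])]
    · rw [ih, ih (runs := [])]

-- Consecutive members of `values` just extend the current run.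
theorem listrunGo_extend (values : List Int) (run : List Int) (r rest : List Int)
    (hr : ∀ a ∈ r, a ∈ values) :
    listrunGo values [] run (r ++ rest) = listrunGo values [] (run ++ r) rest := by
  induction r generalizing run with
  | nil => simp
  | cons a r ih =>
    have ha : a ∈ values := hr a (by simp)
    simp only [List.cons_append, listrunGo, if_pos ha]
    rw [ih _ (fun b hb => hr b (by simp [hb]))]
    simp

-- Consecutive non-members with an empty current run are no-ops.
theorem listrunGo_skip (values : List Int) (r rest : List Int)
    (hr : ∀ a ∈ r, a ∉ values) :
    listrunGo values [] [] (r ++ rest) = listrunGo values [] [] rest := by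
  induction r with
  | nil => simp
  | cons a r ih =>
    have ha : a ∉ values := hr a (by simp)
    simp only [List.cons_append, listrunGo, if_neg ha]
    simpa using ih (fun b hb => hr b (by simp [hb]))

-- The first element surviving `dropWhile` falsifies the predicate.
theorem dropWhile_head_false {α : Type} (p : α → Bool) (l : List α) (y : α) (ys : List α)
    (h : l.dropWhile p = y :: ys) : p y = false := by
  induction l with
  | nil => simp at h
  | cons a l ih =>
    rw [List.dropWhile_cons] at h
    split at h
    · exact ih h
    · next hp => cases h; simpa using hp

-- Flushing a pending nonempty run when the rest starts with a non-member (or is empty).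
theorem listrunGo_flush (values : List Int) (run : List Int) (d : List Int)
    (hd : ∀ y ys, d = y :: ys → y ∉ values) :
    listrunGo values [] run d =
      (if 1 < run.length then [run] else []) ++ listrunGo values [] [] d := by
  cases d with
  | nil =>
    simp only [listrunGo]
    split_ifs with h1 h2 <;> simp_all
  | cons y ys =>
    have hy : y ∉ values := hd y ys rfl
    have hr : listrunGo values [] [] (y :: ys) = listrunGo values [] [] ys := by
      simp [listrunGo, if_neg hy]
    rw [hr]
    conv_lhs => rw [listrunGo, if_neg hy]
    split_ifs with h1 h2
    · rw [listrunGo_append]; simp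
    · simp
    · have hrun : run = [] := by
        cases run with
        | nil => rfl
        | cons a r => simp at h1 h2; exact absurd h1 h2
      subst hrun; simp

theorem listrunGo_eq_chunks (values : List Int) (l : List Int) :
    listrunGo values [] [] l = (chunkBy values l).filterMap chunkSel := by
  induction l using chunkBy.induct values with
  | case1 => simp [listrunGo, chunkBy]
  | case2 x xs k s ih =>
    rw [chunkBy]
    simp only [List.span_eq_takeWhile_dropWhile] at ih ⊢
    by_cases hx : x ∈ values
    · have hk : decide (x ∈ values) = true := by simpa using hx
      have ht : ∀ a ∈ xs.takeWhile (fun y => decide (y ∈ values) == decide (x ∈ values)),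
          a ∈ values := by
        intro a ha
        have := List.mem_takeWhile_imp ha
        simp [hk] at this
        exact this
      have hxs := (List.takeWhile_append_dropWhile
        (p := fun y => decide (y ∈ values) == decide (x ∈ values)) (l := xs)).symm
      simp only [s, k, List.span_eq_takeWhile_dropWhile] at ih
      have hd : ∀ y ys,
          xs.dropWhile (fun y => decide (y ∈ values) == decide (x ∈ values)) = y :: ys →
          y ∉ values := by
        intro y ys h
        have := dropWhile_head_false _ _ _ _ h
        simp [hk] at this
        exact this
      conv_lhs => rw [listrunGo, if_pos hx, List.nil_append, hxs]
      rw [listrunGo_extend values [x] _ _ ht, listrunGo_flush values _ _ hd, ih,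
        List.filterMap_cons]
      simp only [List.singleton_append, chunkSel, hk]
      split_ifs with h <;> simp
    · have hk : decide (x ∈ values) = false := by simpa using hx
      have ht : ∀ a ∈ xs.takeWhile (fun y => decide (y ∈ values) == decide (x ∈ values)),
          a ∉ values := by
        intro a ha
        have := List.mem_takeWhile_imp ha
        simp [hk] at this
        exact this
      have hxs := (List.takeWhile_append_dropWhile
        (p := fun y => decide (y ∈ values) == decide (x ∈ values)) (l := xs)).symm
      simp only [s, k, List.span_eq_takeWhile_dropWhile] at ih
      conv_lhs => rw [listrunGo, if_neg hx]
      simp only [List.length_nil, gt_iff_lt, Nat.not_lt_zero, if_false]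
      conv_lhs => rw [hxs]
      rw [listrunGo_skip values _ _ ht, ih]
      simp [chunkSel, hk]

-- ---------- B-side: the boundary pipeline equals the chunk decomposition ----------

def psF (mem : List Bool) (i : Nat) : Bool :=
  mem.getD i false && (i == 0 || !(mem.getD (i - 1) false))
def peF (mem : List Bool) (i : Nat) : Bool :=
  mem.getD i false && (i == mem.length - 1 || !(mem.getD (i + 1) false))
def startsIdx (mem : List Bool) : List Nat := (List.range mem.length).filter (psF mem)
def endsIdx (mem : List Bool) : List Nat := (List.range mem.length).filter (peF mem)
def core (pat : List Int) (mem : List Bool) : List (List Int) :=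
  ((startsIdx mem).zip ((endsIdx mem).map (· + 1))).filterMap
    (fun p => if 1 < p.2 - p.1 then some ((pat.drop p.1).take (p.2 - p.1)) else none)

theorem alt_eq_core (pattern values : List Int) :
    listrun_alt pattern values = core pattern (pattern.map (fun x => decide (x ∈ values))) := by
  unfold listrun_alt core startsIdx endsIdx psF peF
  simp only [List.length_map]

theorem getD_append_lt (l₁ l₂ : List Bool) (i : Nat) (h : i < l₁.length) :
    (l₁ ++ l₂).getD i false = l₁.getD i false := by
  simp [List.getD_eq_getElem?_getD, List.getElem?_append_left h]

theorem getD_append_ge (l₁ l₂ : List Bool) (i : Nat) (h : l₁.length ≤ i) :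
    (l₁ ++ l₂).getD i false = l₂.getD (i - l₁.length) false := by
  simp [List.getD_eq_getElem?_getD, List.getElem?_append_right h]

theorem getD_replicate_lt (L : Nat) (k : Bool) (i : Nat) (h : i < L) :
    (List.replicate L k).getD i false = k := by
  simp [List.getD_eq_getElem?_getD, h]

theorem filter_range_zero (L : Nat) (hL : 1 ≤ L) :
    (List.range L).filter (fun i => i == 0) = [0] := by
  obtain ⟨L', rfl⟩ : ∃ L', L = L' + 1 := ⟨L - 1, by omega⟩
  rw [List.range_succ_eq_map, List.filter_cons]
  simp [List.filter_map]

theorem filter_range_last (L : Nat) (hL : 1 ≤ L) :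
    (List.range L).filter (fun i => i == L - 1) = [L - 1] := by
  obtain ⟨L', rfl⟩ : ∃ L', L = L' + 1 := ⟨L - 1, by omega⟩
  rw [List.range_succ, List.filter_append, List.filter_cons]
  have h0 : (List.range L').filter (fun i => i == L' + 1 - 1) = [] := by
    apply List.filter_eq_nil_iff.mpr
    intro a ha
    have h := List.mem_range.mp ha
    simp only [beq_iff_eq]
    omega
  rw [h0]
  simp

theorem startsIdx_append (L : Nat) (hL : 1 ≤ L) (k : Bool) (memr : List Bool)
    (hk : k = true → memr.getD 0 false = false) :
    startsIdx (List.replicate L k ++ memr) =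
      (if k then [0] else []) ++ (startsIdx memr).map (L + ·) := by
  have hlen : (List.replicate L k ++ memr).length = L + memr.length := by simp
  unfold startsIdx
  rw [hlen, List.range_add, List.filter_append, List.filter_map]
  congr 1
  · -- the chunk part of the range
    by_cases hkk : k = true
    · subst hkk
      have hcg : ∀ i ∈ List.range L, psF (List.replicate L true ++ memr) i = (i == 0) := by
        intro i hi
        have hi' := List.mem_range.mp hi
        have h1 : (List.replicate L true ++ memr).getD i false = true := by
          rw [getD_append_lt _ _ _ (by simp only [List.length_replicate]; omega),
            getD_replicate_lt _ _ _ hi']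
        have h2 : (List.replicate L true ++ memr).getD (i - 1) false = true := by
          rw [getD_append_lt _ _ _ (by simp only [List.length_replicate]; omega),
            getD_replicate_lt _ _ _ (by omega)]
        rw [psF, h1, h2]
        simp
      rw [List.filter_congr hcg, filter_range_zero L hL]
      simp
    · have hkf : k = false := by simpa using hkk
      subst hkf
      have h0 : (List.range L).filter (psF (List.replicate L false ++ memr)) = [] := by
        apply List.filter_eq_nil_iff.mpr
        intro i hi
        have hi' := List.mem_range.mp hi
        have h1 : (List.replicate L false ++ memr).getD i false = false := by
          rw [getD_append_lt _ _ _ (by simp only [List.length_replicate]; omega),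
            getD_replicate_lt _ _ _ hi']
        rw [psF, h1]
        simp
      rw [h0]
      simp
  · -- the rest part of the range, shifted by L
    refine congrArg (List.map fun x => L + x) (List.filter_congr ?_)
    intro i hi
    have hi' := List.mem_range.mp hi
    have hgi : (List.replicate L k ++ memr).getD (L + i) false = memr.getD i false := by
      rw [getD_append_ge _ _ _ (by simp only [List.length_replicate]; omega)]
      simp
    have hne : ((L + i : Nat) == 0) = false := by
      simp only [beq_eq_false_iff_ne, ne_eq]
      omega
    cases i with
    | zero =>
      have hprev : (List.replicate L k ++ memr).getD (L + 0 - 1) false = k := by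
        rw [getD_append_lt _ _ _ (by simp only [List.length_replicate]; omega),
          getD_replicate_lt _ _ _ (by omega)]
      cases k with
      | true =>
        rw [Function.comp_apply, psF, psF, hgi, hprev, hne, hk rfl]
        simp
      | false =>
        rw [Function.comp_apply, psF, psF, hgi, hprev, hne]
        simp
    | succ j =>
      have hprev : (List.replicate L k ++ memr).getD (L + (j + 1) - 1) false
          = memr.getD j false := by
        have he : L + (j + 1) - 1 = L + j := by omega
        rw [he, getD_append_ge _ _ _ (by simp only [List.length_replicate]; omega)]
        simp
      have hne' : ((j + 1 : Nat) == 0) = false := by simp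
      rw [Function.comp_apply, psF, psF, hgi, hprev, hne, hne']
      simp

theorem endsIdx_append (L : Nat) (hL : 1 ≤ L) (k : Bool) (memr : List Bool)
    (hk : k = true → memr.getD 0 false = false) :
    endsIdx (List.replicate L k ++ memr) =
      (if k then [L - 1] else []) ++ (endsIdx memr).map (L + ·) := by
  have hlen : (List.replicate L k ++ memr).length = L + memr.length := by simp
  unfold endsIdx
  rw [hlen, List.range_add, List.filter_append, List.filter_map]
  congr 1
  · by_cases hkk : k = true
    · subst hkk
      have hcg : ∀ i ∈ List.range L,
          peF (List.replicate L true ++ memr) i = (i == L - 1) := by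
        intro i hi
        have hi' := List.mem_range.mp hi
        have h1 : (List.replicate L true ++ memr).getD i false = true := by
          rw [getD_append_lt _ _ _ (by simp only [List.length_replicate]; omega),
            getD_replicate_lt _ _ _ hi']
        by_cases hlast : i = L - 1
        · subst hlast
          by_cases hm : memr.length = 0
          · have he : ((L - 1 : Nat) == (List.replicate L true ++ memr).length - 1) = true := by
              rw [hlen]
              simp only [beq_iff_eq]
              omega
            rw [peF, h1, he]
            simp
          · have hnext : (List.replicate L true ++ memr).getD (L - 1 + 1) false = false := by
              have he : L - 1 + 1 = L := by omega
              rw [he, getD_append_ge _ _ _ (by simp only [List.length_replicate]; omega)]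
              simpa using hk rfl
            rw [peF, h1, hnext]
            simp
        · have hnext : (List.replicate L true ++ memr).getD (i + 1) false = true := by
            rw [getD_append_lt _ _ _ (by simp only [List.length_replicate]; omega),
              getD_replicate_lt _ _ _ (by omega)]
          have hne : (i == (List.replicate L true ++ memr).length - 1) = false := by
            rw [hlen]
            simp only [beq_eq_false_iff_ne, ne_eq]
            omega
          have hne' : (i == L - 1) = false := by
            simp only [beq_eq_false_iff_ne, ne_eq]
            omega
          rw [peF, h1, hnext, hne, hne']
          simp
      rw [List.filter_congr hcg, filter_range_last L hL]
      simp
    · have hkf : k = false := by simpa using hkk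
      subst hkf
      have h0 : (List.range L).filter (peF (List.replicate L false ++ memr)) = [] := by
        apply List.filter_eq_nil_iff.mpr
        intro i hi
        have hi' := List.mem_range.mp hi
        have h1 : (List.replicate L false ++ memr).getD i false = false := by
          rw [getD_append_lt _ _ _ (by simp only [List.length_replicate]; omega),
            getD_replicate_lt _ _ _ hi']
        rw [peF, h1]
        simp
      rw [h0]
      simp
  · refine congrArg (List.map fun x => L + x) (List.filter_congr ?_)
    intro i hi
    have hi' := List.mem_range.mp hi
    have hgi : (List.replicate L k ++ memr).getD (L + i) false = memr.getD i false := by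
      rw [getD_append_ge _ _ _ (by simp only [List.length_replicate]; omega)]
      simp
    have hnext : (List.replicate L k ++ memr).getD (L + i + 1) false
        = memr.getD (i + 1) false := by
      rw [getD_append_ge _ _ _ (by simp only [List.length_replicate]; omega)]
      have he : L + i + 1 - (List.replicate L k).length = i + 1 := by
        simp only [List.length_replicate]
        omega
      rw [he]
    have hlaste : ((L + i : Nat) == (List.replicate L k ++ memr).length - 1)
        = (i == memr.length - 1) := by
      rw [hlen]
      by_cases h : i = memr.length - 1
      · subst h
        have h2 : L + (memr.length - 1) = L + memr.length - 1 := by omega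
        rw [h2]
        simp
      · have h2 : ((L + i : Nat) == L + memr.length - 1) = false := by
          simp only [beq_eq_false_iff_ne, ne_eq]
          omega
        have h3 : ((i : Nat) == memr.length - 1) = false := by
          simp only [beq_eq_false_iff_ne, ne_eq]
          exact h
        rw [h2, h3]
    rw [Function.comp_apply, peF, peF, hgi, hnext, hlaste]

theorem drop_append_len {α : Type} (l₁ l₂ : List α) (i : Nat) :
    (l₁ ++ l₂).drop (l₁.length + i) = l₂.drop i := by
  induction l₁ with
  | nil => simp
  | cons a l ih =>
    have h : (a :: l).length + i = (l.length + i) + 1 := by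
      simp only [List.length_cons]
      omega
    rw [h, List.cons_append, List.drop_succ_cons, ih]

theorem core_chunk (values : List Int) (pat : List Int) :
    core pat (pat.map (fun x => decide (x ∈ values)))
      = (chunkBy values pat).filterMap chunkSel := by
  induction pat using chunkBy.induct values with
  | case1 => simp [core, startsIdx, endsIdx, chunkBy]
  | case2 x xs k s ih =>
    rw [chunkBy]
    simp only [List.span_eq_takeWhile_dropWhile] at ih ⊢
    simp only [s, k, List.span_eq_takeWhile_dropWhile] at ih
    set f : Int → Bool := fun x => decide (x ∈ values) with hf
    set c : List Int := x :: xs.takeWhile (fun y => f y == f x) with hc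
    set rest : List Int := xs.dropWhile (fun y => f y == f x) with hrest
    have hL : 1 ≤ c.length := by rw [hc]; simp
    have hsplit : x :: xs = c ++ rest := by
      rw [hc, hrest]
      simp [List.takeWhile_append_dropWhile]
    have hcmem : c.map f = List.replicate c.length (f x) := by
      rw [List.eq_replicate_iff]
      constructor
      · simp
      · intro b hb
        rw [List.mem_map] at hb
        obtain ⟨a, ha, rfl⟩ := hb
        rw [hc] at ha
        rcases List.mem_cons.mp ha with rfl | ha'
        · rfl
        · have := List.mem_takeWhile_imp ha'
          simpa using this
    have hkrest : f x = true → ((rest.map f).getD 0 false) = false := by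
      intro hfx
      cases hre : rest with
      | nil => simp
      | cons y ys =>
        have hdw := dropWhile_head_false (fun y => f y == f x) xs y ys (by rw [← hrest, hre])
        rw [hfx] at hdw
        simp only [beq_true] at hdw
        simp [hdw]
    have hmap : (c ++ rest).map f = List.replicate c.length (f x) ++ rest.map f := by
      rw [List.map_append, hcmem]
    rw [hsplit, core, hmap,
      startsIdx_append c.length hL (f x) (rest.map f) hkrest,
      endsIdx_append c.length hL (f x) (rest.map f) hkrest]
    have htail :
        (((startsIdx (rest.map f)).map (c.length + ·)).zip
            (((endsIdx (rest.map f)).map (c.length + ·)).map (· + 1))).filterMap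
          (fun p => if 1 < p.2 - p.1 then some (((c ++ rest).drop p.1).take (p.2 - p.1)) else none)
        = core rest (rest.map f) := by
      have hm : ((endsIdx (rest.map f)).map (c.length + ·)).map (· + 1)
          = ((endsIdx (rest.map f)).map (· + 1)).map (c.length + ·) := by
        rw [List.map_map, List.map_map]
        apply List.map_congr_left
        intro a _
        simp only [Function.comp_apply]
        omega
      rw [hm, List.zip_map, List.filterMap_map, core]
      apply List.filterMap_congr
      intro p _
      simp only [Function.comp_apply, Prod.map]
      have h1 : c.length + p.2 - (c.length + p.1) = p.2 - p.1 := by omega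
      rw [h1, drop_append_len]
    by_cases hfx : f x = true
    · rw [hfx]
      simp only [if_true]
      have he : c.length - 1 + 1 = c.length := by omega
      rw [List.singleton_append, List.singleton_append, List.map_cons, he,
        List.zip_cons_cons]
      simp only [List.filterMap_cons]
      rw [htail, ih]
      have hsel : chunkSel (decide (x ∈ values), c) = if 1 < c.length then some c else none := by
        have hfx' : decide (x ∈ values) = true := hfx
        rw [chunkSel]
        simp [hfx']
      have hfn : (if 1 < c.length - 0 then
            some (((c ++ rest).drop 0).take (c.length - 0)) else none)
          = if 1 < c.length then some c else none := by
        simp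
      rw [hsel, hfn]
    · have hfx' : f x = false := by simpa using hfx
      rw [hfx']
      simp only [Bool.false_eq_true, if_false, List.nil_append]
      simp only [List.filterMap_cons]
      rw [htail, ih]
      have hsel : chunkSel (decide (x ∈ values), c) = none := by
        have hfx'' : decide (x ∈ values) = false := hfx'
        rw [chunkSel]
        simp [hfx'']
      rw [hsel]

theorem alt_eq_chunks (values : List Int) (pat : List Int) :
    listrun_alt pat values = (chunkBy values pat).filterMap chunkSel := by
  rw [alt_eq_core, core_chunk]

-- ===== VERDICT (by name: the statement is the Claim_ definition above) =====
theorem listrun_spec : Claim_equal_listrun := by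
  intro pattern values _
  unfold Spec_listrun listrun
  rw [listrunGo_eq_chunks, ← alt_eq_chunks]
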